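-- pv_equiv track=rewrite | github.com/jSith/da-linguistics | find_author.py | split_phrase
-- ===== SOURCE A (Python) =====
-- def split_phrase(text):
--
--     commaSplit = text.split(',')
--     finalSplit = []
--
--     for comma in commaSplit:
--         semiSplit = comma.split(';')
--         for semi in semiSplit:
--             hyphenSplit = semi.split('-')
--             for hyphen in hyphenSplit:
--                 if len(hyphen) > 0:
--                     finalSplit.append(hyphen)
--
--     return finalSplit
-- ===== SOURCE B (Python) =====
-- def split_phrase(text):
--     # one linear scan with a character buffer instead of nested split passes
--     result = []
--     buf = []
--     for ch in text:
--         if ch == ',' or ch == ';' or ch == '-':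
--             if buf:
--                 result.append(''.join(buf))
--                 buf = []
--         else:
--             buf.append(ch)
--     if buf:
--         result.append(''.join(buf))
--     return result
-- ===== Notes on version B (the rewrite author's own statement) =====
-- stated objective: alternative
-- what changed: Replaces the three nested comma/semicolon/hyphen split passes with a single linear scan over the characters that flushes a token buffer at each delimiter, dropping empty tokens.
import Mathlib
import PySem

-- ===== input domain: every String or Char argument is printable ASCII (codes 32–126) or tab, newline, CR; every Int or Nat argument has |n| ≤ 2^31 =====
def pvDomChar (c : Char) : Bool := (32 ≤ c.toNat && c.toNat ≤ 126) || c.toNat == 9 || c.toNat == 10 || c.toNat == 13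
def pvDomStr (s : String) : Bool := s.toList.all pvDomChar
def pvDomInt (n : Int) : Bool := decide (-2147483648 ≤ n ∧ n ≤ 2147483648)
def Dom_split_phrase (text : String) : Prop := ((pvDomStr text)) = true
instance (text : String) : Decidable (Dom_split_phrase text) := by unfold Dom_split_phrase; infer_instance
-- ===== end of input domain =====

-- B replaces A's three nested split passes by one linear scan with a buffer; same O(n) cost, different decomposition.

-- ===== PORT A =====
-- literal transliteration of A: split on ',', then each piece on ';', then each on '-', appending non-empty pieces
def split_phrase (text : String) : List String :=
  ((PySem.Chars.splitOn text.toList [',']).foldl (fun finalSplit comma =>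
    (PySem.Chars.splitOn comma [';']).foldl (fun fs1 semi =>
      (PySem.Chars.splitOn semi ['-']).foldl (fun fs2 hyphen =>
        if 0 < hyphen.length then fs2 ++ [hyphen] else fs2) fs1) finalSplit) []).map String.ofList

-- ===== PORT B =====
-- 'if buf: result.append("".join(buf))' — the flush step of B, used in the loop and once after it
def pvFlush (st : List (List Char) × List Char) : List (List Char) :=
  if st.2.isEmpty then st.1 else st.1 ++ [st.2]

-- literal transliteration of B: one pass over the characters, flushing the buffer at each delimiter
def split_phrase_alt (text : String) : List String :=
  (pvFlush (text.toList.foldl (fun (st : List (List Char) × List Char) ch =>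
    if ch == ',' || ch == ';' || ch == '-' then (pvFlush st, [])
    else (st.1, st.2 ++ [ch])) ([], []))).map String.ofList

-- ===== PRECONDITION & SPEC =====
def Spec_split_phrase (text : String) (out : List String) : Prop := out = split_phrase_alt text
instance (text : String) (out : List String) : Decidable (Spec_split_phrase text out) := by unfold Spec_split_phrase; infer_instance

-- ===== CLAIM (what is proved, stated in full; the proofs are below) =====
def Claim_equal_split_phrase : Prop := ∀ (text : String), Dom_split_phrase text → Spec_split_phrase text (split_phrase text)

-- ===== LEMMAS AND PROOFS =====

-- simple reference splitter on a character predicate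
def splitP (p : Char → Bool) : List Char → List (List Char)
  | [] => [[]]
  | d :: rest =>
    if p d then [] :: splitP p rest
    else (d :: (splitP p rest).headI) :: (splitP p rest).tail

theorem splitP_ne_nil (p : Char → Bool) (cs : List Char) : splitP p cs ≠ [] := by
  cases cs with
  | nil => simp [splitP]
  | cons d rest => simp only [splitP]; split_ifs <;> simp

theorem splitP_cons_decomp (p : Char → Bool) (cs : List Char) :
    splitP p cs = (splitP p cs).headI :: (splitP p cs).tail := by
  cases h : splitP p cs with
  | nil => exact absurd h (splitP_ne_nil p cs)
  | cons a t => simp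

-- PySem single-char splitOn agrees with splitP
theorem go_single (c : Char) : ∀ (fuel : Nat) (l cur : List Char) (acc : List (List Char)),
    l.length < fuel →
    PySem.Chars.splitOn.go [c] fuel l cur acc =
      acc.reverse ++ (cur.reverse ++ (splitP (· == c) l).headI) :: (splitP (· == c) l).tail := by
  intro fuel
  induction fuel with
  | zero => intro l cur acc h; omega
  | succ f ih =>
    intro l cur acc h
    cases l with
    | nil => simp [PySem.Chars.splitOn.go, splitP]
    | cons d rest =>
      simp only [PySem.Chars.splitOn.go]
      by_cases hd : d = c
      · subst hd
        have hpre : [d].isPrefixOf (d :: rest) = true := by simp [List.isPrefixOf]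
        rw [if_pos hpre]
        have := ih rest [] (cur.reverse :: acc) (by simp at h ⊢; omega)
        rw [show List.drop [d].length (d :: rest) = rest by simp, this]
        simp [splitP, ← splitP_cons_decomp]
      · have hpre : [c].isPrefixOf (d :: rest) = false := by
          simp [List.isPrefixOf]; exact fun hc => absurd hc.symm hd
        rw [if_neg (by simp [hpre])]
        have := ih rest (d :: cur) acc (by simp at h ⊢; omega)
        rw [this]
        have hbd : (d == c) = false := by simp [hd]
        simp [splitP, hbd]

theorem splitOn_single (c : Char) (s : List Char) :
    PySem.Chars.splitOn s [c] = splitP (· == c) s := by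
  unfold PySem.Chars.splitOn
  rw [go_single c (s.length + 1) s [] [] (by omega)]
  simpa using (splitP_cons_decomp (· == c) s).symm

-- splitting, then splitting each piece again, is splitting on the disjunction
theorem splitP_or (p q : Char → Bool) : ∀ (cs : List Char),
    (splitP p cs).flatMap (splitP q) = splitP (fun c => p c || q c) cs := by
  intro cs
  induction cs with
  | nil => simp [splitP]
  | cons d rest ih =>
    by_cases hp : p d
    · simp [splitP, hp, ih]
    · by_cases hq : q d
      · rw [show splitP p (d :: rest) = (d :: (splitP p rest).headI) :: (splitP p rest).tail by
            simp [splitP, hp]]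
        rw [show splitP (fun c => p c || q c) (d :: rest)
              = [] :: splitP (fun c => p c || q c) rest by simp [splitP, hp, hq]]
        rw [← ih]
        conv_rhs => rw [splitP_cons_decomp p rest]
        simp [splitP, hq]
      · rw [show splitP p (d :: rest) = (d :: (splitP p rest).headI) :: (splitP p rest).tail by
            simp [splitP, hp]]
        rw [show splitP (fun c => p c || q c) (d :: rest)
              = (d :: (splitP (fun c => p c || q c) rest).headI)
                  :: (splitP (fun c => p c || q c) rest).tail by simp [splitP, hp, hq]]
        rw [← ih]
        conv_rhs => rw [splitP_cons_decomp p rest]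
        rw [List.flatMap_cons]
        rw [show splitP q (d :: (splitP p rest).headI)
              = (d :: (splitP q (splitP p rest).headI).headI)
                  :: (splitP q (splitP p rest).headI).tail by simp [splitP, hq]]
        cases hEq : splitP q (splitP p rest).headI with
        | nil => exact absurd hEq (splitP_ne_nil _ _)
        | cons a t => simp [hEq]

theorem foldl_congr' {α β : Type} (f g : β → α → β) (h : ∀ a x, f a x = g a x) :
    ∀ (l : List α) (init : β), l.foldl f init = l.foldl g init := by
  have hfg : f = g := funext fun a => funext fun x => h a x
  intro l init; rw [hfg]

-- foldl-append loops as flatMap / filter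
theorem foldl_filter (P : List Char → Bool) :
    ∀ (l : List (List Char)) (acc : List (List Char)),
      l.foldl (fun fs h => if P h then fs ++ [h] else fs) acc = acc ++ l.filter P := by
  intro l
  induction l with
  | nil => simp
  | cons a t ih =>
    intro acc
    by_cases h : P a <;> simp [h, ih]

theorem foldl_flat {α : Type} (g : α → List (List Char)) :
    ∀ (l : List α) (acc : List (List Char)),
      l.foldl (fun a x => a ++ g x) acc = acc ++ l.flatMap g := by
  intro l
  induction l with
  | nil => simp
  | cons a t ih => intro acc; simp [ih]

theorem filter_flatMap' {α : Type} (P : List Char → Bool) (f : α → List (List Char)) :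
    ∀ (l : List α), (l.flatMap f).filter P = l.flatMap (fun x => (f x).filter P) := by
  intro l
  induction l with
  | nil => simp
  | cons a t ih => simp [ih]

def pvDelim (c : Char) : Bool := c == ',' || c == ';' || c == '-'

def pvNE (h : List Char) : Bool := decide (0 < h.length)

-- characterization of A's nested loops
theorem portA_eq (text : String) :
    split_phrase text = ((splitP pvDelim text.toList).filter pvNE).map String.ofList := by
  unfold split_phrase
  have hinner : ∀ (semi : List Char) (fs2 : List (List Char)),
      (PySem.Chars.splitOn semi ['-']).foldl
        (fun fs2 hyphen => if 0 < hyphen.length then fs2 ++ [hyphen] else fs2) fs2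
        = fs2 ++ (splitP (· == '-') semi).filter pvNE := by
    intro semi fs2
    rw [splitOn_single]
    have := foldl_filter pvNE (splitP (· == '-') semi) fs2
    simpa [pvNE] using this
  have hmid : ∀ (comma : List Char) (fs1 : List (List Char)),
      (PySem.Chars.splitOn comma [';']).foldl
        (fun fs1 semi => (PySem.Chars.splitOn semi ['-']).foldl
          (fun fs2 hyphen => if 0 < hyphen.length then fs2 ++ [hyphen] else fs2) fs1) fs1
        = fs1 ++ (splitP (fun c => c == ';' || c == '-') comma).filter pvNE := by
    intro comma fs1
    rw [splitOn_single]
    rw [foldl_congr' _ (fun a x => a ++ (splitP (· == '-') x).filter pvNE)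
        (fun a x => hinner x a)]
    rw [foldl_flat, ← filter_flatMap', splitP_or]
  rw [splitOn_single]
  rw [foldl_congr' _ (fun a x => a ++ (splitP (fun c => c == ';' || c == '-') x).filter pvNE)
      (fun a x => hmid x a)]
  rw [foldl_flat, ← filter_flatMap', splitP_or]
  simp only [List.nil_append]
  have hfun : (fun c => c == ',' || (c == ';' || c == '-')) = pvDelim := by
    funext c; rw [pvDelim, Bool.or_assoc]
  rw [hfun]

-- characterization of B's scan
theorem scanB_eq : ∀ (cs : List Char) (out : List (List Char)) (buf : List Char),
    pvFlush (cs.foldl (fun (st : List (List Char) × List Char) ch =>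
        if ch == ',' || ch == ';' || ch == '-' then (pvFlush st, [])
        else (st.1, st.2 ++ [ch])) (out, buf))
      = out ++ ((buf ++ (splitP pvDelim cs).headI) :: (splitP pvDelim cs).tail).filter pvNE := by
  intro cs
  induction cs with
  | nil =>
    intro out buf
    cases buf <;> simp [splitP, pvFlush, pvNE]
  | cons d rest ih =>
    intro out buf
    by_cases hd : pvDelim d
    · have hstep : (if d == ',' || d == ';' || d == '-' then (pvFlush (out, buf), ([] : List Char))
        else (out, buf ++ [d])) = (pvFlush (out, buf), []) := by
        simp only [pvDelim] at hd; rw [if_pos hd]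
      simp only [List.foldl_cons, hstep]
      rw [ih]
      rw [show splitP pvDelim (d :: rest) = [] :: splitP pvDelim rest by simp [splitP, hd]]
      conv_rhs => rw [splitP_cons_decomp pvDelim rest]
      cases buf <;> simp [pvFlush, pvNE, List.filter_cons]
    · have hstep : (if d == ',' || d == ';' || d == '-' then (pvFlush (out, buf), ([] : List Char))
        else (out, buf ++ [d])) = (out, buf ++ [d]) := by
        simp only [pvDelim] at hd; rw [if_neg (by simpa using hd)]
      simp only [List.foldl_cons, hstep]
      rw [ih]
      rw [show splitP pvDelim (d :: rest)
            = (d :: (splitP pvDelim rest).headI) :: (splitP pvDelim rest).tail by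
          simp [splitP, hd]]
      simp

theorem portB_eq (text : String) :
    split_phrase_alt text = ((splitP pvDelim text.toList).filter pvNE).map String.ofList := by
  unfold split_phrase_alt
  rw [scanB_eq text.toList [] []]
  conv_rhs => rw [splitP_cons_decomp pvDelim text.toList]
  simp

-- ===== VERDICT (by name: the statement is the Claim_ definition above) =====
theorem split_phrase_spec : Claim_equal_split_phrase := by
  intro text _
  unfold Spec_split_phrase
  rw [portA_eq, portB_eq]
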